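-- pv_equiv track=rewrite | github.com/btknight/btk_pe | pe885.py | f
-- ===== SOURCE A (Python) =====
-- from typing import Iterator, List
--
-- def as_digits(n: int, ge: int = 0, le: int = 9, base: int = 10) -> Iterator[int]:
--     """Returns individual digits of a number."""
--     if n == 0 and ge <= n <= le:
--         yield 0
--         return
--     while n > 0:
--         next_n = n % base
--         if ge <= next_n <= le:
--             yield next_n
--         n = n // base
--
-- def f(n: int, mod: int) -> int:
--     """Function as described in the problem. Breaks apart a number into """
--     if n < 10:
--         return n
--     result = 0
--     for d in sorted(as_digits(n, ge=1)):
--         result *= 10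
--         result += d
--     return result % mod
-- ===== SOURCE B (Python) =====
-- def f(n: int, mod: int) -> int:
--     if n < 10:
--         return n
--     counts = [0] * 10
--     while n > 0:
--         d = n % 10
--         if d >= 1:
--             counts[d] += 1
--         n //= 10
--     result = 0
--     for d in range(1, 10):
--         for _ in range(counts[d]):
--             result = result * 10 + d
--     return result % mod
-- ===== Notes on version B (the rewrite author's own statement) =====
-- stated objective: alternative
-- what changed: Replaces the generator + comparison sort over the digits with a length-10 counting array filled in one digit pass and a counting-sort style rebuild of the result, so no sort is performed.
-- outside the precondition, e.g. on f(10, 0): A raises ZeroDivisionError, B raises ZeroDivisionError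
import Mathlib
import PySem

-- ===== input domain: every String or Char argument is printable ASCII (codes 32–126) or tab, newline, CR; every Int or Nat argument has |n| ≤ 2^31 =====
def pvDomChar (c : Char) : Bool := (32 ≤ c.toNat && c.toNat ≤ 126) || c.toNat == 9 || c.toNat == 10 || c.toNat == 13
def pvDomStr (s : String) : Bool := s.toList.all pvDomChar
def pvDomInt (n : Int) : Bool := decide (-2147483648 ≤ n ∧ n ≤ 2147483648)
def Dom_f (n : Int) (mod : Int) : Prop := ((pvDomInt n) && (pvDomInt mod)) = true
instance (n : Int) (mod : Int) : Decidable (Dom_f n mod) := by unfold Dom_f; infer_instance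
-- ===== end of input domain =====

-- B replaces the generator + comparison sort over the digits with a length-10 counting
-- array and a counting-sort style rebuild (alternative algorithm, no sort performed).

-- ===== PORT A =====
-- as_digits(n, ge=1): the 'n == 0' special case never yields (ge=1 fails 1 <= 0),
-- so only the while-loop remains; digits come least-significant first.
def digitsA (n : Int) : List Int :=
  if h : 0 < n then
    let next_n := PySem.Int.mod n 10
    let rest := digitsA (PySem.Int.floordiv n 10)
    if 1 ≤ next_n ∧ next_n ≤ 9 then next_n :: rest else rest
  else []
termination_by n.toNat
decreasing_by
  rw [PySem.Int.floordiv_eq_ediv_of_pos (by norm_num)]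
  have h2 : n / 10 * 10 ≤ n := Int.ediv_mul_le _ (by norm_num)
  have h3 : 0 ≤ n / 10 := Int.ediv_nonneg (le_of_lt h) (by norm_num)
  omega

def f (n : Int) (mod : Int) : Int :=
  if n < 10 then n
  else
    PySem.Int.mod
      ((PySem.List.sorted (digitsA n) (fun x => x) false).foldl
        (fun result d => result * 10 + d) 0) mod

-- ===== PORT B =====
-- the while loop filling counts[0..9]; d = n % 10 lies in [0, 9], so plain Nat
-- indexing (d.toNat) is exact for Python's counts[d] here.
def countsB (n : Int) (counts : List Int) : List Int :=
  if h : 0 < n then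
    let d := PySem.Int.mod n 10
    let counts' := if 1 ≤ d then counts.set d.toNat (counts.getD d.toNat 0 + 1) else counts
    countsB (PySem.Int.floordiv n 10) counts'
  else counts
termination_by n.toNat
decreasing_by
  rw [PySem.Int.floordiv_eq_ediv_of_pos (by norm_num)]
  have h2 : n / 10 * 10 ≤ n := Int.ediv_mul_le _ (by norm_num)
  have h3 : 0 ≤ n / 10 := Int.ediv_nonneg (le_of_lt h) (by norm_num)
  omega

-- the two nested for-loops: for d in range(1, 10): for _ in range(counts[d]): …
def buildB (counts : List Int) : Int :=
  (PySem.List.pyRange 1 10 1).foldl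
    (fun result d =>
      (List.range (counts.getD d.toNat 0).toNat).foldl (fun result _ => result * 10 + d) result)
    0

def f_alt (n : Int) (mod : Int) : Int :=
  if n < 10 then n
  else PySem.Int.mod (buildB (countsB n (List.replicate 10 0))) mod

-- ===== PRECONDITION & SPEC =====
-- Pre_ excludes only the inputs where the Python raises: n ≥ 10 with mod = 0 is a
-- ZeroDivisionError in A (and in B).
def Pre_f (n : Int) (mod : Int) : Prop := n < 10 ∨ mod ≠ 0
instance (n : Int) (mod : Int) : Decidable (Pre_f n mod) := by unfold Pre_f; infer_instance
def pvWitness_f : Int × Int := (2741, 1000)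

def Spec_f (n : Int) (mod : Int) (out : Int) : Prop := out = f_alt n mod
instance (n : Int) (mod : Int) (out : Int) : Decidable (Spec_f n mod out) := by unfold Spec_f; infer_instance

-- ===== CLAIM (what is proved, stated in full; the proofs are below) =====
def Claim_equal_f : Prop := ∀ (n : Int) (mod : Int), Dom_f n mod → Pre_f n mod → Spec_f n mod (f n mod)

-- ===== LEMMAS AND PROOFS =====

-- every digit A keeps lies in [1, 9]
theorem digitsA_mem (n : Int) : ∀ x ∈ digitsA n, 1 ≤ x ∧ x ≤ 9 := by
  fun_induction digitsA n with
  | case1 n hn d rest hc ih =>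
    intro x hx
    rcases List.mem_cons.mp hx with h1 | h1
    · subst h1; exact hc
    · exact ih x h1
  | case2 n hn d rest hc ih => exact ih
  | case3 n hn => intro x hx; simp at hx

theorem digitsA_cons (n : Int) (hn : 0 < n) (hc : 1 ≤ PySem.Int.mod n 10) :
    digitsA n = PySem.Int.mod n 10 :: digitsA (PySem.Int.floordiv n 10) := by
  have h9 : PySem.Int.mod n 10 ≤ 9 := by
    have := PySem.Int.mod_lt n (b := 10) (by norm_num)
    omega
  rw [digitsA, dif_pos hn]
  exact if_pos ⟨hc, h9⟩

theorem digitsA_skip (n : Int) (hn : 0 < n) (hc : ¬ 1 ≤ PySem.Int.mod n 10) :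
    digitsA n = digitsA (PySem.Int.floordiv n 10) := by
  rw [digitsA, dif_pos hn]
  exact if_neg (fun hand => hc hand.1)

-- counting invariant: countsB adds the digit multiplicities to the array
theorem countsB_getD (k : Nat) (hk : k < 10) (n : Int) (counts : List Int) :
    counts.length = 10 →
    (countsB n counts).getD k 0 = counts.getD k 0 + ((digitsA n).count (k : Int) : Int) := by
  fun_induction countsB n counts with
  | case1 n counts hn d counts' ih =>
    intro hlen
    have hd0 : (0 : Int) ≤ d := PySem.Int.mod_nonneg n (b := 10) (by norm_num)
    have hd9 : d < 10 := PySem.Int.mod_lt n (b := 10) (by norm_num)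
    by_cases hc : 1 ≤ d
    · have hcs : counts' = counts.set d.toNat (counts.getD d.toNat 0 + 1) := if_pos hc
      have hlen' : counts'.length = 10 := by rw [hcs, List.length_set, hlen]
      rw [ih hlen', digitsA_cons n hn hc, List.count_cons]
      by_cases hkd : k = d.toNat
      · subst hkd
        have hget : counts'.getD d.toNat 0 = counts.getD d.toNat 0 + 1 := by
          rw [hcs]
          simp only [List.getD, List.getElem?_set]
          have hdl : d.toNat < counts.length := by omega
          simp [hdl]
        rw [hget, Int.toNat_of_nonneg hd0,
          show (PySem.Int.mod n 10 == d) = true from beq_self_eq_true d]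
        simp only [if_true]
        push_cast
        omega
      · have hget : counts'.getD k 0 = counts.getD k 0 := by
          rw [hcs]
          simp only [List.getD, List.getElem?_set]
          rw [if_neg (fun h => hkd h.symm)]
        have hdk : (d == (k : Int)) = false := by
          rw [beq_eq_false_iff_ne]
          intro he
          exact hkd (by rw [he]; simp)
        rw [hget, hdk]
        simp
    · have hcs : counts' = counts := if_neg hc
      rw [hcs] at ih ⊢
      rw [ih hlen, digitsA_skip n hn hc]
  | case2 n counts hn =>
    intro _
    rw [digitsA.eq_def]
    simp [hn]

-- the sorted digit list is the concatenation of the per-digit replicates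
theorem sorted_eq_flatMap (L : List Int) (hL : ∀ x ∈ L, 1 ≤ x ∧ x ≤ 9) :
    PySem.List.sorted L (fun x => x) false =
      (PySem.List.pyRange 1 10 1).flatMap (fun d => List.replicate (L.count d) d) := by
  apply PySem.List.sorted_id_eq_of_perm_of_pairwise
  · rw [List.perm_iff_count]
    intro a
    by_cases ha : 1 ≤ a ∧ a ≤ 9
    · obtain ⟨h1, h2⟩ := ha
      rw [show PySem.List.pyRange 1 10 1 = [1,2,3,4,5,6,7,8,9] from rfl]
      interval_cases a <;>
        simp [List.count_append, List.count_replicate]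
    · have hys : a ∉ (PySem.List.pyRange 1 10 1).flatMap
          (fun d => List.replicate (L.count d) d) := by
        intro hmem
        rw [List.mem_flatMap] at hmem
        obtain ⟨d, hd, hrep⟩ := hmem
        rw [PySem.List.mem_pyRange_one] at hd
        have := (List.eq_of_mem_replicate hrep)
        omega
      have hLa : a ∉ L := fun hmem => ha (hL a hmem)
      rw [List.count_eq_zero.mpr hys, List.count_eq_zero.mpr hLa]
  · rw [show PySem.List.pyRange 1 10 1 = [1,2,3,4,5,6,7,8,9] from rfl]
    simp only [List.flatMap_cons, List.flatMap_nil, List.append_nil]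
    simp [List.pairwise_append, List.pairwise_replicate, List.mem_replicate]
    refine ⟨⟨⟨⟨⟨⟨?_, ?_⟩, ?_⟩, ?_⟩, ?_⟩, ?_⟩, ?_⟩ <;> (intro _ b hb; omega)

-- iterating 'result = result*10 + d' c times: range form = replicate form
theorem range_fold_eq_replicate_fold (d : Int) (c : Nat) (r : Int) :
    (List.range c).foldl (fun result _ => result * 10 + d) r =
      (List.replicate c d).foldl (fun result x => result * 10 + x) r := by
  induction c with
  | zero => rfl
  | succ m ih =>
    rw [List.range_succ, List.foldl_append, List.replicate_succ', List.foldl_append, ih]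
    simp

theorem main_eq (n : Int) (h : ¬ n < 10) :
    (PySem.List.sorted (digitsA n) (fun x => x) false).foldl
        (fun result d => result * 10 + d) 0 =
      buildB (countsB n (List.replicate 10 0)) := by
  rw [sorted_eq_flatMap (digitsA n) (digitsA_mem n)]
  have hcnt : ∀ k : Nat, k < 10 →
      (countsB n (List.replicate 10 0)).getD k 0 = ((digitsA n).count (k : Int) : Int) := by
    intro k hk
    rw [countsB_getD k hk n _ (by simp)]
    interval_cases k <;> simp
  unfold buildB
  rw [show PySem.List.pyRange 1 10 1 = [1,2,3,4,5,6,7,8,9] from rfl]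
  simp only [List.flatMap_cons, List.flatMap_nil, List.append_nil, List.foldl_append,
    List.foldl_cons, List.foldl_nil]
  rw [show ((1:Int)).toNat = 1 from rfl, show ((2:Int)).toNat = 2 from rfl,
    show ((3:Int)).toNat = 3 from rfl, show ((4:Int)).toNat = 4 from rfl,
    show ((5:Int)).toNat = 5 from rfl, show ((6:Int)).toNat = 6 from rfl,
    show ((7:Int)).toNat = 7 from rfl, show ((8:Int)).toNat = 8 from rfl,
    show ((9:Int)).toNat = 9 from rfl]
  rw [hcnt 1 (by norm_num), hcnt 2 (by norm_num), hcnt 3 (by norm_num),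
    hcnt 4 (by norm_num), hcnt 5 (by norm_num), hcnt 6 (by norm_num),
    hcnt 7 (by norm_num), hcnt 8 (by norm_num), hcnt 9 (by norm_num)]
  simp only [Int.toNat_natCast]
  simp only [range_fold_eq_replicate_fold]
  norm_num

-- ===== VERDICT (by name: the statement is the Claim_ definition above) =====
theorem f_spec : Claim_equal_f := by
  intro n mod _ _
  unfold Spec_f f f_alt
  by_cases h : n < 10
  · simp [h]
  · simp [h, main_eq n h]
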